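-- pv_equiv track=rewrite | github.com/NastyBoget/hrtr | lines_segmentation/lines_seg_rule_based.py | sort_bboxes
-- ===== SOURCE A (Python) =====
-- from typing import List
--
-- def sort_bboxes(bboxes: List[tuple]) -> List[List[tuple]]:
--     lines_list = []
--     bboxes = sorted(bboxes, key=lambda x: x[1])
--     for bbox in bboxes:
--         if len(lines_list) == 0:
--             lines_list.append([bbox])
--             continue
--         iou_threshold = 0.4
--         prev_bbox = lines_list[-1][-1]
--         min_y1, max_y1 = min(bbox[1], prev_bbox[1]), max(bbox[1], prev_bbox[1])
--         min_y2, max_y2 = min(bbox[3], prev_bbox[3]), max(bbox[3], prev_bbox[3])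
--         threshold = (min_y2 - max_y1) / (max_y2 - min_y1)
--         if threshold >= iou_threshold:
--             lines_list[-1].append(bbox)
--         else:
--             lines_list.append([bbox])
--     lines_list = [sorted(line) for line in lines_list]
--     return lines_list
-- ===== SOURCE B (Python) =====
-- from typing import List
--
--
-- def _same_line(prev_bbox: tuple, bbox: tuple) -> bool:
--     min_y1, max_y1 = min(bbox[1], prev_bbox[1]), max(bbox[1], prev_bbox[1])
--     min_y2, max_y2 = min(bbox[3], prev_bbox[3]), max(bbox[3], prev_bbox[3])
--     return (min_y2 - max_y1) / (max_y2 - min_y1) >= 0.4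
--
--
-- def sort_bboxes(bboxes: List[tuple]) -> List[List[tuple]]:
--     rest = sorted(bboxes, key=lambda x: x[1])
--     lines = []
--     while rest:
--         n = 1
--         while n < len(rest) and _same_line(rest[n - 1], rest[n]):
--             n += 1
--         lines.append(sorted(rest[:n]))
--         rest = rest[n:]
--     return lines
-- ===== Notes on version B (the rewrite author's own statement) =====
-- stated objective: alternative
-- what changed: Instead of A's incremental accumulator that appends each bbox to the mutable last line (lines_list[-1]), B splits whole lines off the front of the sorted list with a two-pointer scan (advance n while consecutive bboxes overlap, then slice off rest[:n] and sort it), so no list of lines is ever mutated in place.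
import Mathlib
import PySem

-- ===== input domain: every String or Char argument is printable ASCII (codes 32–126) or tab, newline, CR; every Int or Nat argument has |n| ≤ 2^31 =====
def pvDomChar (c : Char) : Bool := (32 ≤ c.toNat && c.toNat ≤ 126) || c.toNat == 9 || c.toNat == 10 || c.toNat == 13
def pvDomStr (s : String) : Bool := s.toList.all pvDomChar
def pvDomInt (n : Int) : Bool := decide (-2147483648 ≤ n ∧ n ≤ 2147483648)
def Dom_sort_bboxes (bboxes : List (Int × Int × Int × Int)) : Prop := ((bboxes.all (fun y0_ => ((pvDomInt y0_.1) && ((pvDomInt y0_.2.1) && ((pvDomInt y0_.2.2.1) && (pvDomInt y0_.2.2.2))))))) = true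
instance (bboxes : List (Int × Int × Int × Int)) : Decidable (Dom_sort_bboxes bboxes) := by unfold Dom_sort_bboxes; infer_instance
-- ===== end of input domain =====

-- B replaces A's incremental accumulator (append each bbox to the mutable last line) by a
-- two-pointer scan that splits one whole line at a time off the front of the sorted list
-- (objective: alternative decomposition, same asymptotic cost).

-- ===== SHARED HELPERS (both Pythons evaluate these exact built-in expressions) =====

-- Exact integer model of the float test `(min_y2 - max_y1) / (max_y2 - min_y1) >= 0.4`,
-- which both Source A and Source B compute verbatim on a pair of bboxes.  On the domain
-- (|coordinates| ≤ 2^31) numerator a and denominator b are exact doubles and the division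
-- is correctly rounded, so `a/b >= 0.4` holds iff the rational a/b ≥ 14411518807585587/2^55
-- (the midpoint of the double 0.4 = 7205759403792794/2^54 and its predecessor; the tie
-- rounds to even, i.e. up to 0.4 itself).  Exact for b ≠ 0; b = 0 is a ZeroDivisionError
-- in both Pythons and is excluded by Pre_sort_bboxes.
def sameLine (prev_bbox bbox : Int × Int × Int × Int) : Bool :=
  let a := min bbox.2.2.2 prev_bbox.2.2.2 - max bbox.2.1 prev_bbox.2.1
  let b := max bbox.2.2.2 prev_bbox.2.2.2 - min bbox.2.1 prev_bbox.2.1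
  if 0 < b then decide (14411518807585587 * b ≤ a * 2 ^ 55)
  else decide (a * 2 ^ 55 ≤ 14411518807585587 * b)

-- Python's `a < b` on 4-tuples of ints: lexicographic strict comparison.
def tupLt (a b : Int × Int × Int × Int) : Bool :=
  decide (a.1 < b.1 ∨ (a.1 = b.1 ∧ (a.2.1 < b.2.1 ∨ (a.2.1 = b.2.1 ∧
    (a.2.2.1 < b.2.2.1 ∨ (a.2.2.1 = b.2.2.1 ∧ a.2.2.2 < b.2.2.2))))))

-- Python's `sorted(line)` on 4-tuples: PySem's stable insertion sort with the
-- lexicographic strict order (the foldl/insertBy form PySem.List.sorted reduces to;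
-- Mathlib's `<` on products is not lexicographic, hence the explicit comparator).
def sortLine (line : List (Int × Int × Int × Int)) : List (Int × Int × Int × Int) :=
  line.foldl (fun acc x => PySem.List.insertBy tupLt x acc) []

-- ===== PORT A =====

-- one iteration of A's for-loop over `lines_list` (list[-1] accesses are guarded nonempty)
def stepA (lines_list : List (List (Int × Int × Int × Int))) (bbox : Int × Int × Int × Int) :
    List (List (Int × Int × Int × Int)) :=
  if lines_list.length = 0 then lines_list ++ [[bbox]]
  else
    let prev_bbox := lines_list.getLast!.getLast!
    if sameLine prev_bbox bbox then
      lines_list.dropLast ++ [lines_list.getLast! ++ [bbox]]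
    else lines_list ++ [[bbox]]

def sort_bboxes (bboxes : List (Int × Int × Int × Int)) : List (List (Int × Int × Int × Int)) :=
  let sorted_bboxes := PySem.List.sorted bboxes (fun x => x.2.1) false
  let lines_list := sorted_bboxes.foldl stepA []
  lines_list.map sortLine

-- ===== PORT B =====

-- Source B's inner while: advance n while rest[n-1] and rest[n] overlap (the guard keeps both
-- indices in range, so List.getD is exact Python indexing here)
def lineLen (rest : List (Int × Int × Int × Int)) (n : Nat) : Nat :=
  if h : n < rest.length ∧
      sameLine (rest.getD (n - 1) default) (rest.getD n default) = true then
    lineLen rest (n + 1)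
  else n
termination_by rest.length - n
decreasing_by omega

theorem le_lineLen (rest : List (Int × Int × Int × Int)) (n : Nat) : n ≤ lineLen rest n := by
  unfold lineLen
  split
  · exact le_trans (by omega) (le_lineLen rest (n + 1))
  · exact le_refl n
termination_by rest.length - n
decreasing_by omega

-- Source B's outer while: slice the leading line `rest[:n]` off, sort it, continue on `rest[n:]`
def splitLines (rest : List (Int × Int × Int × Int)) : List (List (Int × Int × Int × Int)) :=
  if _h : rest.isEmpty then []
  else
    let n := lineLen rest 1
    sortLine (rest.take n) :: splitLines (rest.drop n)
termination_by rest.length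
decreasing_by
  simp only [List.length_drop]
  have h1 : 1 ≤ lineLen rest 1 := le_lineLen rest 1
  have h2 : rest.length ≠ 0 := by simpa [List.isEmpty_iff, List.length_eq_zero_iff] using _h
  omega

def sort_bboxes_alt (bboxes : List (Int × Int × Int × Int)) : List (List (Int × Int × Int × Int)) :=
  let rest := PySem.List.sorted bboxes (fun x => x.2.1) false
  splitLines rest

-- ===== PRECONDITION & SPEC =====

-- Pre_ excludes exactly the inputs on which both Pythons raise ZeroDivisionError: some pair
-- of consecutive bboxes in the y1-sorted order with max(y2s) - min(y1s) = 0.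
def Pre_sort_bboxes (bboxes : List (Int × Int × Int × Int)) : Prop :=
  (let sb := PySem.List.sorted bboxes (fun x => x.2.1) false
   (sb.zip sb.tail).all
     (fun pb => max pb.2.2.2.2 pb.1.2.2.2 - min pb.2.2.1 pb.1.2.1 ≠ 0)) = true
instance (bboxes : List (Int × Int × Int × Int)) : Decidable (Pre_sort_bboxes bboxes) := by
  unfold Pre_sort_bboxes; infer_instance

def pvWitness_sort_bboxes : (List (Int × Int × Int × Int)) := [(0, 0, 5, 10), (1, 1, 6, 11), (0, 30, 5, 40)]

def Spec_sort_bboxes (bboxes : List (Int × Int × Int × Int)) (out : List (List (Int × Int × Int × Int))) : Prop := out = sort_bboxes_alt bboxes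
instance (bboxes : List (Int × Int × Int × Int)) (out : List (List (Int × Int × Int × Int))) : Decidable (Spec_sort_bboxes bboxes out) := by unfold Spec_sort_bboxes; infer_instance

-- ===== CLAIM (what is proved, stated in full; the proofs are below) =====
def Claim_equal_sort_bboxes : Prop := ∀ (bboxes : List (Int × Int × Int × Int)), Dom_sort_bboxes bboxes → Pre_sort_bboxes bboxes → Spec_sort_bboxes bboxes (sort_bboxes bboxes)

-- ===== LEMMAS AND PROOFS =====

-- common specification both ports are reduced to: chunk the sorted list into maximal
-- runs of consecutively overlapping bboxes
def spanLine (p : Int × Int × Int × Int) :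
    List (Int × Int × Int × Int) → List (Int × Int × Int × Int) × List (Int × Int × Int × Int)
  | [] => ([], [])
  | y :: ys =>
    if sameLine p y then
      let s := spanLine y ys
      (y :: s.1, s.2)
    else ([], y :: ys)

theorem spanLine_snd_length (p : Int × Int × Int × Int) (l : List (Int × Int × Int × Int)) :
    (spanLine p l).2.length ≤ l.length := by
  induction l generalizing p with
  | nil => simp [spanLine]
  | cons y ys ih =>
    simp only [spanLine]
    split
    · exact le_trans (ih y) (by simp)
    · simp

def chunks : List (Int × Int × Int × Int) → List (List (Int × Int × Int × Int))
  | [] => []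
  | x :: xs => (x :: (spanLine x xs).1) :: chunks (spanLine x xs).2
termination_by l => l.length
decreasing_by
  have := spanLine_snd_length x xs
  simp
  omega

theorem spanLine_append (p : Int × Int × Int × Int) (l : List (Int × Int × Int × Int)) :
    (spanLine p l).1 ++ (spanLine p l).2 = l := by
  induction l generalizing p with
  | nil => simp [spanLine]
  | cons y ys ih =>
    simp only [spanLine]
    split
    · simp [ih y]
    · simp

-- A's fold, with a nonempty accumulator whose last line ends in p, finishes the current
-- line with the span of p and then chunks the remainder.
theorem foldA (l : List (Int × Int × Int × Int)) :
    ∀ (acc : List (List (Int × Int × Int × Int))) (g : List (Int × Int × Int × Int))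
      (p : Int × Int × Int × Int),
    List.foldl stepA (acc ++ [g ++ [p]]) l
      = acc ++ ((g ++ p :: (spanLine p l).1) :: chunks (spanLine p l).2) := by
  induction l with
  | nil => intro acc g p; simp [spanLine, chunks]
  | cons y ys ih =>
    intro acc g p
    simp only [List.foldl_cons, spanLine]
    have hstep : stepA (acc ++ [g ++ [p]]) y =
        if sameLine p y then acc ++ [(g ++ [p]) ++ [y]]
        else (acc ++ [g ++ [p]]) ++ [[y]] := by
      simp [stepA]
    rw [hstep]
    by_cases hc : sameLine p y
    · simp only [hc, if_true]
      have := ih acc (g ++ [p]) y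
      simp only [List.append_assoc] at this ⊢
      rw [this]
      simp
    · simp only [hc, Bool.false_eq_true, if_false]
      have := ih (acc ++ [g ++ [p]]) [] y
      simp only [List.nil_append, List.append_assoc] at this ⊢
      rw [this]
      simp [chunks]

theorem foldA_nil (l : List (Int × Int × Int × Int)) :
    List.foldl stepA [] l = chunks l := by
  cases l with
  | nil => simp [chunks]
  | cons x xs =>
    have h0 : stepA [] x = [] ++ [[] ++ [x]] := by simp [stepA]
    simp only [List.foldl_cons, h0]
    rw [foldA xs [] [] x]
    simp [chunks]

-- bridge from Source B's index scan to the structural span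
theorem lineLen_bridge (l : List (Int × Int × Int × Int)) (i : Nat) (hi : i < l.length) :
    lineLen l (i + 1) = (i + 1) + (spanLine (l.getD i default) (l.drop (i + 1))).1.length := by
  unfold lineLen
  simp only [Nat.add_sub_cancel]
  split
  · rename_i h
    obtain ⟨h1, h2⟩ := h
    have hdrop : l.drop (i + 1) = l.getD (i + 1) default :: l.drop (i + 1 + 1) := by
      rw [List.getD_eq_getElem l default h1]
      exact List.drop_eq_getElem_cons h1
    rw [hdrop]
    simp only [spanLine, h2, if_true, List.length_cons]
    rw [lineLen_bridge l (i + 1) h1]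
    omega
  · rename_i h
    by_cases h1 : i + 1 < l.length
    · have h2 : ¬ sameLine (l.getD i default) (l.getD (i + 1) default) = true := by
        intro hc; exact h ⟨h1, hc⟩
      have hdrop : l.drop (i + 1) = l.getD (i + 1) default :: l.drop (i + 1 + 1) := by
        rw [List.getD_eq_getElem l default h1]
        exact List.drop_eq_getElem_cons h1
      rw [hdrop]
      simp only [spanLine]
      rw [if_neg h2]
      simp
    · have : l.drop (i + 1) = [] := List.drop_eq_nil_of_le (by omega)
      simp [this, spanLine]
termination_by l.length - i
decreasing_by omega

theorem splitLines_eq_chunks (l : List (Int × Int × Int × Int)) :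
    splitLines l = (chunks l).map sortLine := by
  unfold splitLines
  split
  · rename_i h
    have : l = [] := by simpa [List.isEmpty_iff] using h
    simp [this, chunks]
  · rename_i h
    have hne : l ≠ [] := by simpa [List.isEmpty_iff] using h
    obtain ⟨x, xs, rfl⟩ := List.exists_cons_of_ne_nil hne
    obtain ⟨g, r, hgr, hxs⟩ : ∃ g r, spanLine x xs = (g, r) ∧ xs = g ++ r :=
      ⟨_, _, rfl, (spanLine_append x xs).symm⟩
    have hb : lineLen (x :: xs) 1 = 1 + g.length := by
      have := lineLen_bridge (x :: xs) 0 (by simp)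
      simpa [hgr] using this
    show sortLine ((x :: xs).take (lineLen (x :: xs) 1))
        :: splitLines ((x :: xs).drop (lineLen (x :: xs) 1)) = (chunks (x :: xs)).map sortLine
    have htake : (x :: xs).take (lineLen (x :: xs) 1) = x :: g := by
      rw [hb, Nat.add_comm, hxs]
      simp
    have hdrop : (x :: xs).drop (lineLen (x :: xs) 1) = r := by
      rw [hb, Nat.add_comm, hxs]
      simp
    rw [htake, hdrop, splitLines_eq_chunks r]
    simp [chunks, hgr]
termination_by l.length
decreasing_by
  have hl : l.length = xs.length + 1 := by rw [‹l = x :: xs›]; rfl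
  have hr : r.length ≤ xs.length := by rw [hxs]; simp
  omega

-- ===== VERDICT (by name: the statement is the Claim_ definition above) =====
theorem sort_bboxes_spec : Claim_equal_sort_bboxes := by
  intro bboxes _ _
  show List.map sortLine (List.foldl stepA [] (PySem.List.sorted bboxes (fun x => x.2.1) false))
      = splitLines (PySem.List.sorted bboxes (fun x => x.2.1) false)
  rw [foldA_nil, splitLines_eq_chunks]
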